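-- pv_equiv track=rewrite | github.com/pangeran-bottor/coding_challenges | codeforces/round_634_div_3/C.py | solve
-- ===== SOURCE A (Python) =====
-- def solve(n, a):
--     if n == 1:
--         return 0
--     if n == 2:
--         return 1
--     if n == 3:
--         return 1
--
--     freq = {}
--     for num in a:
--         if num not in freq:
--             freq[num] = 0
--         freq[num] += 1
--
--     if len(freq) == n:
--         return 1
--
--     freqlist = [(key, freq[key]) for key in freq]
--     freqlist.sort(key=lambda x: -x[1])
--
--     max_x = 0
--     for f in freqlist:
--         el = f[0]
--         count = f[1]
--
--         freq[el] -= min(count, n//2)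
--
--         team2_count = min(count, n//2)
--         team1_count = 0
--         for key in freq:
--             if freq[key] > 0:
--                 team1_count += 1
--         curr_count = min(team1_count, team2_count)
--         max_x = max(max_x, curr_count)
--
--         freq[el] += min(count, n//2)
--     return max_x
-- ===== SOURCE B (Python) =====
-- def solve(n, a):
--     if n == 1:
--         return 0
--     if n == 2 or n == 3:
--         return 1
--     freq = {}
--     for x in a:
--         freq[x] = freq.get(x, 0) + 1
--     d = len(freq)
--     if d == n:
--         return 1
--     half = n // 2
--     best = 0
--     for c in freq.values():
--         cand = min(d - (1 if c <= half else 0), min(c, half))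
--         if cand > best:
--             best = cand
--     return best
-- ===== Notes on version B (the rewrite author's own statement) =====
-- stated objective: faster
-- what changed: Replaces the sort and the per-element rescan of the whole frequency dict (which recomputed the positive-count distinct total for every key) with a single pass over the counts, using the fact that the remaining distinct count is len(freq) minus 1 exactly when count <= n//2.
import Mathlib
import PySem

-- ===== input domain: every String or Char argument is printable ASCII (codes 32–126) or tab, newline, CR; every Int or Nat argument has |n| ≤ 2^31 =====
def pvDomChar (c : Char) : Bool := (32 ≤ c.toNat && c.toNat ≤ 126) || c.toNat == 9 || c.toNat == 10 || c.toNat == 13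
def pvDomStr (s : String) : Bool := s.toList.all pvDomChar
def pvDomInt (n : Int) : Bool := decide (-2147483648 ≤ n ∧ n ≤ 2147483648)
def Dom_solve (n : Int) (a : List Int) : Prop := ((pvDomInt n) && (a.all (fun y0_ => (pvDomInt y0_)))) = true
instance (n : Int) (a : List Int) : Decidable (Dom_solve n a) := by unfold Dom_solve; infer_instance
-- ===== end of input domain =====

-- B replaces A's sort + per-key rescan of the whole frequency dict by a single pass over
-- the counts (the surviving distinct count is len(freq) minus 1 exactly when count <= n//2);
-- a timing run measures the speed-up.


-- ===== PORT A =====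
-- A's first loop: 'if num not in freq: freq[num] = 0' then 'freq[num] += 1'
def pyBuildFreq (a : List Int) : PySem.Dict Int Int :=
  a.foldl (fun freq num =>
    let freq := if freq.contains num then freq else freq.insert num 0
    freq.modify num 0 (· + 1)) PySem.Dict.empty

-- A's main-loop body: mutate freq, count positive entries, update max_x, restore freq
def pyLoopStep (n : Int) (st : PySem.Dict Int Int × Int) (f : Int × Int) :
    PySem.Dict Int Int × Int :=
  let freq := st.1
  let max_x := st.2
  let el := f.1
  let count := f.2
  let freq := freq.modify el 0 (fun v => v - min count (PySem.Int.floordiv n 2))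
  let team2_count := min count (PySem.Int.floordiv n 2)
  let team1_count := freq.keys.foldl
    (fun acc key => if freq.getD key 0 > 0 then acc + 1 else acc) 0
  let curr_count := min team1_count team2_count
  let max_x := max max_x curr_count
  let freq := freq.modify el 0 (fun v => v + min count (PySem.Int.floordiv n 2))
  (freq, max_x)

def solve (n : Int) (a : List Int) : Int :=
  if n == 1 then 0
  else if n == 2 then 1
  else if n == 3 then 1
  else
    let freq := pyBuildFreq a
    if (freq.size : Int) == n then 1
    else
      let freqlist := freq.keys.map (fun key => (key, freq.getD key 0))
      let freqlist := PySem.List.sorted freqlist (fun x => -x.2) false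
      (freqlist.foldl (pyLoopStep n) (freq, 0)).2

-- ===== PORT B =====
def solve_alt (n : Int) (a : List Int) : Int :=
  if n == 1 then 0
  else if n == 2 || n == 3 then 1
  else
    let freq := a.foldl (fun d x => d.insert x (d.getD x 0 + 1)) PySem.Dict.empty
    let d : Int := (freq.size : Int)
    if d == n then 1
    else
      let half := PySem.Int.floordiv n 2
      freq.values.foldl (fun best c =>
        let cand := min (d - (if c ≤ half then 1 else 0)) (min c half)
        if cand > best then cand else best) 0

-- ===== PRECONDITION & SPEC =====
def Spec_solve (n : Int) (a : List Int) (out : Int) : Prop := out = solve_alt n a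
instance (n : Int) (a : List Int) (out : Int) : Decidable (Spec_solve n a out) := by
  unfold Spec_solve; infer_instance

-- ===== CLAIM (what is proved, stated in full; the proofs are below) =====
def Claim_equal_solve : Prop := ∀ (n : Int) (a : List Int), Dom_solve n a → Spec_solve n a (solve n a)

-- ===== LEMMAS AND PROOFS =====

-- the closed-form candidate B computes for an item (value, count)
def teamCand (n : Int) (D : Int) (p : Int × Int) : Int :=
  min (D - (if p.2 ≤ PySem.Int.floordiv n 2 then 1 else 0)) (min p.2 (PySem.Int.floordiv n 2))

-- one step of A's counting loop, lookup side
theorem step_getD (d : PySem.Dict Int Int) (num v : Int) :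
    ((if d.contains num then d else d.insert num 0).modify num 0 (· + 1)).getD v 0 =
      if v = num then d.getD v 0 + 1 else d.getD v 0 := by
  by_cases hc : d.contains num
  · simp [hc, PySem.Dict.getD_modify]
    by_cases hv : v = num <;> simp [hv]
  · simp [Bool.not_eq_true] at hc
    rw [if_neg (by simp [hc])]
    rw [PySem.Dict.getD_modify]
    by_cases hv : v = num <;>
      simp [hv, PySem.Dict.getD_insert, PySem.Dict.getD_of_not_contains _ _ hc]

theorem buildFoldl_getD (l : List Int) (d : PySem.Dict Int Int) (v : Int) :
    (l.foldl (fun freq num =>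
      let freq := if freq.contains num then freq else freq.insert num 0
      freq.modify num 0 (· + 1)) d).getD v 0 = d.getD v 0 + (l.count v : Int) := by
  induction l generalizing d with
  | nil => simp
  | cons x t ih =>
    simp only [List.foldl_cons]
    rw [ih, step_getD]
    by_cases hv : v = x <;> simp [hv, List.count_cons] <;> omega

-- A's builder counts occurrences: getD is List.count
theorem pyBuildFreq_getD (a : List Int) (v : Int) :
    (pyBuildFreq a).getD v 0 = (a.count v : Int) := by
  simp [pyBuildFreq, buildFoldl_getD, PySem.Dict.getD_empty]

-- one step of A's counting loop, key-list side
theorem step_keys (d : PySem.Dict Int Int) (num : Int) :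
    ((if d.contains num then d else d.insert num 0).modify num 0 (· + 1)).keys =
      PySem.Set.add d.keys num := by
  by_cases hc : d.contains num
  · rw [if_pos hc, PySem.Dict.keys_modify, PySem.Dict.keys_insert_of_contains _ _ hc]
    have : num ∈ d.keys := (PySem.Dict.contains_iff_mem_keys d num).mp hc
    simp [PySem.Set.add, PySem.Set.contains, this]
  · simp only [Bool.not_eq_true] at hc
    rw [if_neg (by simp [hc]), PySem.Dict.keys_modify,
      PySem.Dict.keys_insert_of_contains _ _ (by simp),
      PySem.Dict.keys_insert_of_not_contains _ _ hc]
    have : num ∉ d.keys := fun h => by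
      rw [(PySem.Dict.contains_iff_mem_keys d num).mpr h] at hc; exact Bool.noConfusion hc
    simp [PySem.Set.add, PySem.Set.contains, this]

theorem buildFoldl_keys (l : List Int) (d : PySem.Dict Int Int) :
    (l.foldl (fun freq num =>
      let freq := if freq.contains num then freq else freq.insert num 0
      freq.modify num 0 (· + 1)) d).keys = PySem.Set.update d.keys l := by
  induction l generalizing d with
  | nil => simp [PySem.Set.update]
  | cons x t ih =>
    simp only [List.foldl_cons]
    rw [ih, step_keys]
    simp [PySem.Set.update]

-- A's builder has the distinct values, in first-occurrence order, as keys
theorem pyBuildFreq_keys (a : List Int) :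
    (pyBuildFreq a).keys = PySem.Set.ofList a := by
  rw [pyBuildFreq, buildFoldl_keys, PySem.Dict.keys_empty, PySem.Set.update_nil_left]

-- counting positive entries over a nodup key list where only `el` can be non-positive
theorem countP_all_but_one {p : Int → Bool} {K : List Int} (hnd : K.Nodup) {el : Int}
    (hel : el ∈ K) (hothers : ∀ k ∈ K, k ≠ el → p k = true) :
    K.countP p = if p el then K.length else K.length - 1 := by
  induction K with
  | nil => cases hel
  | cons k t ih =>
    rcases List.nodup_cons.mp hnd with ⟨hkt, hndt⟩
    rcases List.mem_cons.mp hel with h | h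
    · subst h
      have ht : t.countP p = t.length :=
        List.countP_eq_length.mpr (fun x hx => hothers x (List.mem_cons_of_mem _ hx)
          (fun he => hkt (he ▸ hx)))
      by_cases hp : p el <;> simp [hp, ht]
    · have hk : p k = true := hothers k (List.mem_cons_self ..) (fun he => hkt (he ▸ h))
      have := ih hndt h (fun x hx hne => hothers x (List.mem_cons_of_mem _ hx) hne)
      have hlen : 1 ≤ t.length := List.length_pos_of_mem h
      by_cases hp : p el <;> simp [hk, this, hp] <;> omega

-- A's main loop keeps freq intact (subtract then add back) and is a running max
-- of the closed-form candidate B computes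
theorem loopA (n : Int) (a : List Int) (l : List (Int × Int)) (G : PySem.Dict Int Int) (m : Int)
    (hkeys : G.keys = PySem.Set.ofList a)
    (hg : ∀ v, G.getD v 0 = (a.count v : Int))
    (hl : ∀ p ∈ l, p.1 ∈ PySem.Set.ofList a ∧ (a.count p.1 : Int) = p.2) :
    (l.foldl (pyLoopStep n) (G, m)).2 =
      l.foldl (fun m p => max m (teamCand n ((PySem.Set.ofList a).length : Int) p)) m := by
  induction l generalizing G m with
  | nil => rfl
  | cons p t ih =>
    obtain ⟨hpK, hpc⟩ := hl p (List.mem_cons_self ..)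
    have hmem : p.1 ∈ a := (PySem.Set.mem_ofList _ _).mp hpK
    have hcont : G.contains p.1 = true := (PySem.Dict.contains_iff_mem_keys G p.1).mpr (hkeys ▸ hpK)
    set M := min p.2 (PySem.Int.floordiv n 2) with hM
    set G1 := G.modify p.1 0 (fun v => v - M) with hG1
    have keysG1 : G1.keys = G.keys := by
      rw [hG1, PySem.Dict.keys_modify, PySem.Dict.keys_insert_of_contains _ _ hcont]
    have getDG1 : ∀ v, G1.getD v 0 = if v = p.1 then (a.count p.1 : Int) - M else (a.count v : Int) := by
      intro v
      rw [hG1, PySem.Dict.getD_modify]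
      by_cases hv : v = p.1 <;> simp [hv, hg]
    have hcont1 : G1.contains p.1 = true := by
      rw [PySem.Dict.contains_iff_mem_keys, keysG1]; exact hkeys ▸ hpK
    set G2 := G1.modify p.1 0 (fun v => v + M) with hG2
    have keysG2 : G2.keys = PySem.Set.ofList a := by
      rw [hG2, PySem.Dict.keys_modify, PySem.Dict.keys_insert_of_contains _ _ hcont1, keysG1, hkeys]
    have getDG2 : ∀ v, G2.getD v 0 = (a.count v : Int) := by
      intro v
      rw [hG2, PySem.Dict.getD_modify]
      by_cases hv : v = p.1 <;> simp [hv, getDG1]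
    have hteam1 : G1.keys.foldl (fun acc key => if G1.getD key 0 > 0 then acc + 1 else acc) 0 =
        if (a.count p.1 : Int) - M > 0 then ((PySem.Set.ofList a).length : Int)
        else ((PySem.Set.ofList a).length : Int) - 1 := by
      rw [PySem.List.foldl_ite_add_one, keysG1, hkeys]
      have hlen : 1 ≤ (PySem.Set.ofList a).length := List.length_pos_of_mem hpK
      rw [countP_all_but_one (PySem.Set.nodup_ofList a) hpK
        (fun k hk hne => by
          have hka : k ∈ a := (PySem.Set.mem_ofList _ _).mp hk
          have hcp : 0 < a.count k := List.count_pos_iff.mpr hka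
          simp only [getDG1, if_neg hne, gt_iff_lt, decide_eq_true_eq]
          exact_mod_cast hcp)]
      by_cases hc : (a.count p.1 : Int) - M > 0 <;> simp [getDG1] <;> omega
    have hstep : pyLoopStep n (G, m) p =
        (G2, max m (teamCand n ((PySem.Set.ofList a).length : Int) p)) := by
      show (G2, max m _) = _
      rw [hteam1]
      have : min (if (a.count p.1 : Int) - M > 0 then ((PySem.Set.ofList a).length : Int)
          else ((PySem.Set.ofList a).length : Int) - 1) M =
          teamCand n ((PySem.Set.ofList a).length : Int) p := by
        rw [teamCand, ← hpc]
        have hlen : 1 ≤ (PySem.Set.ofList a).length := List.length_pos_of_mem hpK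
        have hlen' : (1 : Int) ≤ ((PySem.Set.ofList a).length : Int) := by exact_mod_cast hlen
        by_cases hc : (a.count p.1 : Int) ≤ PySem.Int.floordiv n 2 <;>
          simp [hM] <;> omega
      rw [this]
    simp only [List.foldl_cons, hstep]
    exact ih G2 (max m _) keysG2 getDG2 (fun q hq => hl q (List.mem_cons_of_mem _ hq))

-- a dict's size is the length of its key list
theorem size_eq_keys_length (d : PySem.Dict Int Int) : d.size = d.keys.length := by
  simp [PySem.Dict.size, PySem.Dict.keys]

-- a fold over d.values is a fold over d.items reading the second components
theorem values_foldl (d : PySem.Dict Int Int) (h : Int → Int → Int) (i : Int) :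
    d.values.foldl h i = d.items.foldl (fun acc p => h acc p.2) i := by
  simp [PySem.Dict.values, List.foldl_map]

theorem solve_eq (n : Int) (a : List Int) : solve n a = solve_alt n a := by
  by_cases h1 : n = 1
  · simp [solve, solve_alt, h1]
  by_cases h2 : n = 2
  · simp [solve, solve_alt, h2]
  by_cases h3 : n = 3
  · simp [solve, solve_alt, h3]
  rw [solve, solve_alt]
  simp only [h1, h2, h3, beq_iff_eq, if_false, or_self, Bool.or_eq_true]
  rw [PySem.Dict.foldl_insert_getD_add_one_eq_counter]
  have hsizeA : (pyBuildFreq a).size = (PySem.Set.ofList a).length := by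
    rw [size_eq_keys_length, pyBuildFreq_keys]
  have hsizeB : (PySem.Dict.counter a).size = (PySem.Set.ofList a).length := by
    rw [size_eq_keys_length, PySem.Dict.keys_counter]
  rw [hsizeA, hsizeB]
  by_cases hn : ((PySem.Set.ofList a).length : Int) = n
  · simp [hn]
  simp only [hn, if_false]
  have hlist : (pyBuildFreq a).keys.map (fun key => (key, (pyBuildFreq a).getD key 0)) =
      (PySem.Dict.counter a).items := by
    rw [pyBuildFreq_keys, PySem.Dict.items_counter]
    exact List.map_congr_left (fun k _ => by rw [pyBuildFreq_getD])
  rw [hlist]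
  rw [loopA n a _ _ _ (pyBuildFreq_keys a) (pyBuildFreq_getD a)
    (fun p hp => by
      have hp' : p ∈ (PySem.Dict.counter a).items := (PySem.List.mem_sorted _ _ _ _).mp hp
      rw [PySem.Dict.items_counter] at hp'
      obtain ⟨k, hk, rfl⟩ := List.mem_map.mp hp'
      exact ⟨hk, rfl⟩)]
  rw [List.Perm.foldl_eq' (PySem.List.sorted_perm _ _ _)
    (fun x _ y _ z => by
      rw [max_assoc, max_comm (teamCand _ _ x), ← max_assoc])]
  rw [values_foldl]
  apply PySem.List.foldl_congr_mem
  intro acc p _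
  show max acc (teamCand n ((PySem.Set.ofList a).length : Int) p) =
    (let cand := min (((PySem.Set.ofList a).length : Int) -
      (if p.2 ≤ PySem.Int.floordiv n 2 then 1 else 0)) (min p.2 (PySem.Int.floordiv n 2));
    if cand > acc then cand else acc)
  simp only [teamCand]
  by_cases h : min (((PySem.Set.ofList a).length : Int) -
      (if p.2 ≤ PySem.Int.floordiv n 2 then 1 else 0)) (min p.2 (PySem.Int.floordiv n 2)) > acc
  · rw [if_pos h, max_eq_right h.le]
  · rw [if_neg h, max_eq_left (not_lt.mp h)]

-- ===== VERDICT (by name: the statement is the Claim_ definition above) =====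
theorem solve_spec : Claim_equal_solve := by
  intro n a _
  exact solve_eq n a
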